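-- pv_equiv track=rewrite | github.com/dariodinizg/galpao | comission.py | table_to_dictionary
-- ===== SOURCE A (Python) =====
-- def table_to_dictionary(key_list, val_list):
--     my_lista = sorted(list(set(key_list)))
--     table_dictionary = {}
--     for turma in my_lista:
--         values = []
--         table_dictionary[turma.rstrip().lstrip()] = None
--         for row in val_list:
--             if row[0] == turma:
--                 values.append([row[1],row[2],row[3],row[4], row[5], row[6], row[7]])
--         table_dictionary[turma] = values[:]
--
--     return table_dictionary
-- ===== SOURCE B (Python) =====
-- def table_to_dictionary(key_list, val_list):
--     groups = {}
--     for row in val_list: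
--         groups[row[0]] = groups.get(row[0], []) + [row[1:8]]
--     return {k: groups.get(k, []) for k in sorted(set(key_list))}
-- ===== Notes on version B (the rewrite author's own statement) =====
-- stated objective: faster
-- what changed: B replaces A's rescan of val_list for every distinct key (O(K*N)) by one grouping pass over val_list into a dict keyed by row[0], then reads each sorted key out of that dict (O(N + K log K)).
-- outside the precondition, e.g. on table_to_dictionary([' a'], []): A returns {'a': None, ' a': []}, B returns {' a': []}; on table_to_dictionary([], [[]]): A returns {}, B raises IndexError
import Mathlib
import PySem

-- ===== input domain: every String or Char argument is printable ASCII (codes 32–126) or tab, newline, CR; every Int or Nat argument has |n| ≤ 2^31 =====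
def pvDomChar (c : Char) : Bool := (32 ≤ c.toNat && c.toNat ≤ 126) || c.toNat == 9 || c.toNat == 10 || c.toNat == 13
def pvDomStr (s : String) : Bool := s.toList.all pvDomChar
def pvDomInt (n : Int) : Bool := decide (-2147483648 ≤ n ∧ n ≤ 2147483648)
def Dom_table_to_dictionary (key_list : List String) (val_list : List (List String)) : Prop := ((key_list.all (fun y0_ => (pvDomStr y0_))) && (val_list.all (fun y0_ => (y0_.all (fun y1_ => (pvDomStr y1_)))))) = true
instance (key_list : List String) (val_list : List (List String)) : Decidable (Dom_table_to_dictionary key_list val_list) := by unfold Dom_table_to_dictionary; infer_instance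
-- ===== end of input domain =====

-- B groups val_list in ONE pass into a dict keyed by row[0] and then reads each sorted key out of it,
-- instead of A's rescan of val_list for every distinct key (measurably faster: asymptotic).


-- ===== PORT A =====
def table_to_dictionary (key_list : List String) (val_list : List (List String)) : List (String × List (List String)) :=
  let my_lista := PySem.List.sorted (PySem.Set.ofList key_list) (fun x => x)
  let table_dictionary := my_lista.foldl
    (fun (d : PySem.Dict String (List (List String))) turma =>
      let values := val_list.foldl
        (fun vs row =>
          if PySem.List.pyGetD row 0 "" == turma then
            vs ++ [[PySem.List.pyGetD row 1 "", PySem.List.pyGetD row 2 "", PySem.List.pyGetD row 3 "",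
                    PySem.List.pyGetD row 4 "", PySem.List.pyGetD row 5 "", PySem.List.pyGetD row 6 "",
                    PySem.List.pyGetD row 7 ""]]
          else vs) []
      -- table_dictionary[turma.rstrip().lstrip()] = None — the None is represented by []; inside
      -- Pre_ the stripped key equals turma, so this entry is always overwritten by the line below
      let d := d.insert (PySem.Str.lstrip (PySem.Str.rstrip turma)) []
      d.insert turma values)
    PySem.Dict.empty
  table_dictionary.items
  -- row[i] is ported as pyGetD row i ""; Pre_ puts every access in range, so the default is never taken

-- ===== PORT B =====
def table_to_dictionary_alt (key_list : List String) (val_list : List (List String)) : List (String × List (List String)) :=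
  let groups := val_list.foldl
    (fun (g : PySem.Dict String (List (List String))) row =>
      g.modify (PySem.List.pyGetD row 0 "") [] (fun vs => vs ++ [PySem.List.slice row (some 1) (some 8)]))
    PySem.Dict.empty
  (PySem.List.sorted (PySem.Set.ofList key_list) (fun x => x)).map (fun k => (k, groups.getD k []))

-- ===== PRECONDITION & SPEC =====
-- Pre_ excludes (a) inputs where A raises IndexError (an empty row while key_list is nonempty, or a
-- row with fewer than 8 fields whose row[0] occurs in key_list), (b) key lists containing a key with
-- leading/trailing whitespace, on which A returns a dict carrying a None value (not a list) under the
-- stripped key, and (c) empty-row inputs with key_list = [], where A returns {} without ever touching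
-- the rows but B's single pass raises IndexError on row[0].
def Pre_table_to_dictionary (key_list : List String) (val_list : List (List String)) : Prop :=
  (∀ row ∈ val_list, row ≠ [] ∧ (row.getD 0 "" ∈ key_list → 8 ≤ row.length)) ∧
  (∀ k ∈ key_list, PySem.Str.lstrip (PySem.Str.rstrip k) = k)
instance (key_list : List String) (val_list : List (List String)) : Decidable (Pre_table_to_dictionary key_list val_list) := by unfold Pre_table_to_dictionary; infer_instance
def pvWitness_table_to_dictionary : List String × List (List String) :=
  (["b", "a"], [["a", "1", "2", "3", "4", "5", "6", "7"], ["c", "9"]])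

def Spec_table_to_dictionary (key_list : List String) (val_list : List (List String)) (out : List (String × List (List String))) : Prop := out = table_to_dictionary_alt key_list val_list
instance (key_list : List String) (val_list : List (List String)) (out : List (String × List (List String))) : Decidable (Spec_table_to_dictionary key_list val_list out) := by unfold Spec_table_to_dictionary; infer_instance

-- ===== CLAIM (what is proved, stated in full; the proofs are below) =====
def Claim_equal_table_to_dictionary : Prop := ∀ (key_list : List String) (val_list : List (List String)), Dom_table_to_dictionary key_list val_list → Pre_table_to_dictionary key_list val_list → Spec_table_to_dictionary key_list val_list (table_to_dictionary key_list val_list)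
-- ===== LEMMAS AND PROOFS =====

-- proof-only names for A's inner accumulation and B's group dict
def pvValuesA (val_list : List (List String)) (turma : String) : List (List String) :=
  val_list.foldl
    (fun vs row =>
      if PySem.List.pyGetD row 0 "" == turma then
        vs ++ [[PySem.List.pyGetD row 1 "", PySem.List.pyGetD row 2 "", PySem.List.pyGetD row 3 "",
                PySem.List.pyGetD row 4 "", PySem.List.pyGetD row 5 "", PySem.List.pyGetD row 6 "",
                PySem.List.pyGetD row 7 ""]]
      else vs) []

def pvGroupsB (val_list : List (List String)) : PySem.Dict String (List (List String)) :=
  val_list.foldl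
    (fun (g : PySem.Dict String (List (List String))) row =>
      g.modify (PySem.List.pyGetD row 0 "") [] (fun vs => vs ++ [PySem.List.slice row (some 1) (some 8)]))
    PySem.Dict.empty

-- the 7 explicit accesses row[1]…row[7] of A equal B's slice row[1:8] on rows of length ≥ 8
lemma seven_eq_slice (row : List String) (h : 8 ≤ row.length) :
    [PySem.List.pyGetD row 1 "", PySem.List.pyGetD row 2 "", PySem.List.pyGetD row 3 "",
     PySem.List.pyGetD row 4 "", PySem.List.pyGetD row 5 "", PySem.List.pyGetD row 6 "",
     PySem.List.pyGetD row 7 ""] = PySem.List.slice row (some 1) (some 8) := by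
  rw [PySem.List.slice_toNat row (by norm_num) (by norm_num)]
  match row, h with
  | a0 :: a1 :: a2 :: a3 :: a4 :: a5 :: a6 :: a7 :: rest, _ =>
    norm_num [PySem.List.pyGetD_ofNat', List.take]
    rw [show Int.toNat 8 - 1 = 7 from rfl]
    rfl

-- what B's one-pass group dict holds at any key: the rows matching that key, sliced
lemma pvGroupsB_getD (val_list : List (List String)) (k : String) :
    (pvGroupsB val_list).getD k []
      = (val_list.filter (fun row => PySem.List.pyGetD row 0 "" == k)).map
          (fun row => PySem.List.slice row (some 1) (some 8)) := by
  have hmapfold :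
      List.foldl
        (fun (d : PySem.Dict String (List (List String))) p => d.modify p.1 [] (fun vs => vs ++ [p.2]))
        PySem.Dict.empty
        (val_list.map (fun row => (PySem.List.pyGetD row 0 "", PySem.List.slice row (some 1) (some 8))))
      = List.foldl
        (fun (g : PySem.Dict String (List (List String))) row =>
          g.modify (PySem.List.pyGetD row 0 "") [] (fun vs => vs ++ [PySem.List.slice row (some 1) (some 8)]))
        PySem.Dict.empty val_list :=
    List.foldl_map (f := fun row => (PySem.List.pyGetD row 0 "", PySem.List.slice row (some 1) (some 8)))
      (g := fun (d : PySem.Dict String (List (List String))) p => d.modify p.1 [] (fun vs => vs ++ [p.2]))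
  unfold pvGroupsB
  rw [← hmapfold, PySem.Dict.getD_foldl_modify_append, PySem.Dict.getD_empty,
    List.filter_map, List.map_map]
  simp [Function.comp_def]

-- ===== VERDICT (by name: the statement is the Claim_ definition above) =====
theorem table_to_dictionary_spec : Claim_equal_table_to_dictionary := by
  intro key_list val_list _ hpre
  obtain ⟨hrows, hstrip⟩ := hpre
  unfold Spec_table_to_dictionary table_to_dictionary table_to_dictionary_alt
  show (List.foldl
      (fun (d : PySem.Dict String (List (List String))) turma =>
        (d.insert (PySem.Str.lstrip (PySem.Str.rstrip turma)) []).insert turma (pvValuesA val_list turma))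
      PySem.Dict.empty (PySem.List.sorted (PySem.Set.ofList key_list) (fun x => x))).items
    = (PySem.List.sorted (PySem.Set.ofList key_list) (fun x => x)).map
        (fun k => (k, (pvGroupsB val_list).getD k []))
  set L := PySem.List.sorted (PySem.Set.ofList key_list) (fun x : String => x) with hL
  have hsub : ∀ k ∈ L, k ∈ key_list := by
    intro k hk
    exact (PySem.Set.mem_ofList key_list k).1
      ((PySem.List.mem_sorted (PySem.Set.ofList key_list) (fun x => x) false k).1 hk)
  have hnd : L.Nodup :=
    ((PySem.List.sorted_perm (PySem.Set.ofList key_list) (fun x : String => x) false).nodup_iff).2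
      (PySem.Set.nodup_ofList key_list)
  -- inside Pre_ the strip is the identity, so the None entry is overwritten in place
  have hfold : L.foldl
      (fun (d : PySem.Dict String (List (List String))) turma =>
        (d.insert (PySem.Str.lstrip (PySem.Str.rstrip turma)) []).insert turma (pvValuesA val_list turma))
      PySem.Dict.empty
      = L.foldl (fun d turma => d.insert turma (pvValuesA val_list turma)) PySem.Dict.empty := by
    refine PySem.List.foldl_congr_mem L _ _ _ ?_
    intro d turma hmem
    rw [hstrip turma (hsub turma hmem), PySem.Dict.insert_insert_self]
  -- A's dict loop inserts fresh distinct keys, so its items list is a map over L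
  have hitems : (L.foldl (fun (d : PySem.Dict String (List (List String))) turma =>
        d.insert turma (pvValuesA val_list turma)) PySem.Dict.empty).items
      = L.map (fun k => (k, pvValuesA val_list k)) := by
    have := PySem.Dict.items_foldl_insert_fresh L (fun k => k) (pvValuesA val_list) PySem.Dict.empty
      (fun a _ => PySem.Dict.contains_empty a) (by simpa using hnd)
    simpa using this
  rw [hfold, hitems]
  refine List.map_congr_left ?_
  intro k hk
  refine Prod.ext rfl ?_
  show pvValuesA val_list k = _
  rw [pvGroupsB_getD, pvValuesA,
    PySem.List.foldl_append_if (fun row => PySem.List.pyGetD row 0 "" == k)]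
  simp only [List.nil_append]
  refine List.map_congr_left ?_
  intro row hrow
  have hrmem : row ∈ val_list := List.mem_of_mem_filter hrow
  have heq : PySem.List.pyGetD row 0 "" = k := by
    have := List.of_mem_filter hrow
    simpa using this
  have hlen : 8 ≤ row.length := by
    refine (hrows row hrmem).2 ?_
    rw [← PySem.List.pyGetD_zero, heq]
    exact hsub k hk
  exact seven_eq_slice row hlen
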